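-- pv_equiv track=rewrite | github.com/dwarfmaster/MPSI | ipt/td1/5.1-fibo.py | fibodiv
-- ===== SOURCE A (Python) =====
-- def fibodiv(d):
--     n1 = 0
--     n2 = 1
--     n = 1
--     while n2 % d != 0:
--         n = n + 1
--         n3 = n2 + n1
--         n1 = n2
--         n2 = n3
--     return n
-- ===== SOURCE B (Python) =====
-- def _rank(q):
--     # index of first Fibonacci number divisible by q (q >= 2), residues mod q
--     a, b, n = 0, 1 % q, 1
--     while b != 0:
--         a, b = b, (a + b) % q
--         n += 1
--     return n
--
-- def _gcd(a, b):
--     while b: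
--         a, b = b, a % b
--     return a
--
-- def _lcm(a, b):
--     return a * b // _gcd(a, b)
--
-- def fibodiv(d):
--     # rank of apparition is multiplicative over coprime factors:
--     # split |d| into prime powers by trial division, combine the ranks by lcm.
--     m = -d if d < 0 else d
--     ans = 1
--     rem = m
--     p = 2
--     while p * p <= rem:
--         if rem % p == 0:
--             pe = 1
--             while rem % p == 0:
--                 rem //= p
--                 pe *= p
--             ans = _lcm(ans, _rank(pe))
--         p += 1
--     if rem > 1:
--         ans = _lcm(ans, _rank(rem))
--     return ans
-- ===== Notes on version B (the rewrite author's own statement) =====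
-- stated objective: faster
-- what changed: B computes the rank of apparition of |d| instead of scanning big-integer Fibonacci numbers: it factors |d| into prime powers by trial division, finds the rank of each prime power with a short residue loop mod that prime power, and combines them with lcm (the rank of apparition is multiplicative over coprime factors).
-- outside the precondition, e.g. on fibodiv(0): A raises ZeroDivisionError, B returns 1
import Mathlib
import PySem

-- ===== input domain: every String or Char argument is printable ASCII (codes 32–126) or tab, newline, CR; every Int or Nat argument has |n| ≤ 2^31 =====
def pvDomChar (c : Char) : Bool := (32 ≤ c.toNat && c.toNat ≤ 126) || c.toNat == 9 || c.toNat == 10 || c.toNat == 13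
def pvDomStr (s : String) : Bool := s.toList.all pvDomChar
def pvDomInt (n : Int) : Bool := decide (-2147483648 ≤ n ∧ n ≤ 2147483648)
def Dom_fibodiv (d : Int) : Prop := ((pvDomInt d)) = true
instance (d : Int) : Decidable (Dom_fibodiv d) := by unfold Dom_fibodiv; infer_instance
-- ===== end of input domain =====

-- B replaces A's big-integer Fibonacci scan by the rank-of-apparition algorithm: factor |d| into prime
-- powers by trial division, find each rank by a residue loop mod the prime power, and combine with lcm.


-- ===== PORT A =====
-- A's while loop, with a fuel parameter as a totality guard only (the fuel is generous:
-- the loop stops at the rank of apparition of |d|, which is at most |d|^2 — proved below).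
def fibodivLoopA (d : Int) (n1 n2 n : Int) : Nat → Int
  | 0 => n
  | fuel + 1 =>
      if PySem.Int.mod n2 d ≠ 0 then
        fibodivLoopA d n2 (n2 + n1) (n + 1) fuel
      else n

def fibodiv (d : Int) : Int := fibodivLoopA d 0 1 1 (d.natAbs * d.natAbs + 2)

-- ===== PORT B =====
-- _rank(q): residue loop mod q; fuel is a totality guard (rank of q is ≤ q^2).
def altRankLoop (q a b n : Int) : Nat → Int
  | 0 => n
  | fuel + 1 =>
      if b ≠ 0 then
        altRankLoop q b (PySem.Int.mod (a + b) q) (n + 1) fuel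
      else n

def altRank (q : Int) : Int := altRankLoop q 0 (PySem.Int.mod 1 q) 1 (q.natAbs * q.natAbs + 2)

-- _gcd(a, b): Euclid's loop; fuel is a totality guard (|b| strictly decreases).
def altGcdLoop (a b : Int) : Nat → Int
  | 0 => a
  | fuel + 1 => if b ≠ 0 then altGcdLoop b (PySem.Int.mod a b) fuel else a

def altGcd (a b : Int) : Int := altGcdLoop a b (b.natAbs + 1)

def altLcm (a b : Int) : Int := PySem.Int.floordiv (a * b) (altGcd a b)

-- inner 'while rem % p == 0' of fibodiv's trial division (fuel: rem shrinks each step)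
def altExtract (p rem pe : Int) : Nat → Int × Int
  | 0 => (rem, pe)
  | fuel + 1 =>
      if PySem.Int.mod rem p = 0 then
        altExtract p (PySem.Int.floordiv rem p) (pe * p) fuel
      else (rem, pe)

-- outer 'while p * p <= rem' loop, returning the final (rem, ans)
def altOuter (rem p ans : Int) : Nat → Int × Int
  | 0 => (rem, ans)
  | fuel + 1 =>
      if p * p ≤ rem then
        if PySem.Int.mod rem p = 0 then
          altOuter (altExtract p rem 1 (rem.natAbs + 1)).1 (p + 1)
            (altLcm ans (altRank (altExtract p rem 1 (rem.natAbs + 1)).2)) fuel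
        else altOuter rem (p + 1) ans fuel
      else (rem, ans)

-- the post-loop 'if rem > 1: ans = _lcm(ans, _rank(rem)); return ans'
def altFinish (r : Int × Int) : Int := if 1 < r.1 then altLcm r.2 (altRank r.1) else r.2

def fibodiv_alt (d : Int) : Int :=
  altFinish (altOuter (if d < 0 then -d else d) 2 1 ((if d < 0 then -d else d).natAbs + 2))

-- ===== PRECONDITION & SPEC =====
-- A raises ZeroDivisionError on d = 0 (n2 % d); excluded.
def Pre_fibodiv (d : Int) : Prop := d ≠ 0
instance (d : Int) : Decidable (Pre_fibodiv d) := by unfold Pre_fibodiv; infer_instance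
def pvWitness_fibodiv : Int := 7

def Spec_fibodiv (d : Int) (out : Int) : Prop := out = fibodiv_alt d
instance (d : Int) (out : Int) : Decidable (Spec_fibodiv d out) := by unfold Spec_fibodiv; infer_instance

-- ===== CLAIM (what is proved, stated in full; the proofs are below) =====
def Claim_equal_fibodiv : Prop := ∀ (d : Int), Dom_fibodiv d → Pre_fibodiv d → Spec_fibodiv d (fibodiv d)

-- ===== LEMMAS AND PROOFS =====

-- ---- Python floor-mod facts ----
theorem pv_k_eq_zero (b k : Int) (hb : b ≠ 0) (h1 : -|b| < b * k) (h2 : b * k < |b|) : k = 0 := by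
  have habs : |b * k| < |b| := abs_lt.mpr ⟨h1, h2⟩
  rw [abs_mul] at habs
  have hb' : (0 : Int) < |b| := abs_pos.mpr hb
  have hk : |k| < 1 := by
    by_contra h
    push Not at h
    nlinarith
  have := abs_lt.mp hk
  omega

-- floor-mod respects congruence mod b
theorem pymod_congr (b u v : Int) (h : b ∣ u - v) : PySem.Int.mod u b = PySem.Int.mod v b := by
  rcases eq_or_ne b 0 with rfl | hb
  · have : u = v := by
      have := (zero_dvd_iff).mp h
      omega
    rw [this]
  · have hu := PySem.Int.floordiv_mul_add_mod u b
    have hv := PySem.Int.floordiv_mul_add_mod v b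
    obtain ⟨k, hk⟩ := h
    have hdiff : PySem.Int.mod u b - PySem.Int.mod v b
        = b * (k - (PySem.Int.floordiv u b - PySem.Int.floordiv v b)) := by
      linear_combination hk + hu - hv
    have hbd : -|b| < PySem.Int.mod u b - PySem.Int.mod v b ∧
               PySem.Int.mod u b - PySem.Int.mod v b < |b| := by
      rcases lt_or_gt_of_ne hb with hneg | hpos
      · have h1 := PySem.Int.mod_neg_bounds (a := u) hneg
        have h2 := PySem.Int.mod_neg_bounds (a := v) hneg
        rw [abs_of_neg hneg]
        omega
      · have h1 := PySem.Int.mod_nonneg (a := u) hpos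
        have h2 := PySem.Int.mod_nonneg (a := v) hpos
        have h3 := PySem.Int.mod_lt (a := u) hpos
        have h4 := PySem.Int.mod_lt (a := v) hpos
        rw [abs_of_pos hpos]
        omega
    have hk0 : k - (PySem.Int.floordiv u b - PySem.Int.floordiv v b) = 0 :=
      pv_k_eq_zero b _ hb (hdiff ▸ hbd.1) (hdiff ▸ hbd.2)
    rw [hk0, mul_zero] at hdiff
    omega

theorem pymod_sub_self_dvd (b x : Int) : b ∣ PySem.Int.mod x b - x := by
  have h := PySem.Int.floordiv_mul_add_mod x b
  exact ⟨-(PySem.Int.floordiv x b), by linarith [mul_comm b (PySem.Int.floordiv x b)]⟩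

-- 'fib % d == 0' is divisibility by |d|
theorem pymod_cast_eq_zero_iff (d : Int) (x : Nat) :
    PySem.Int.mod (x : Int) d = 0 ↔ d.natAbs ∣ x := by
  rw [PySem.Int.mod_eq_zero_iff_dvd]
  constructor
  · intro h
    exact_mod_cast Int.natAbs_dvd_natAbs.mpr h
  · intro h
    exact (Int.natAbs_dvd).mp (by exact_mod_cast h)

-- ---- the rank of apparition ----

-- pair congruences of Fibonacci descend (the step map is invertible mod m)
theorem fib_pair_descend (m : Nat) :
    ∀ e i j : Nat, Nat.fib (i + e) ≡ Nat.fib (j + e) [MOD m] →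
      Nat.fib (i + e + 1) ≡ Nat.fib (j + e + 1) [MOD m] →
      Nat.fib i ≡ Nat.fib j [MOD m] := by
  intro e
  induction e with
  | zero => intro i j h1 _; simpa using h1
  | succ e ih =>
      intro i j h1 h2
      apply ih i j
      · have h1' : Nat.fib (i + e + 1) ≡ Nat.fib (j + e + 1) [MOD m] := by
          have hi : i + (e + 1) = i + e + 1 := by omega
          have hj : j + (e + 1) = j + e + 1 := by omega
          simpa [hi, hj] using h1
        have h2' : Nat.fib (i + e) + Nat.fib (i + e + 1)
            ≡ Nat.fib (j + e) + Nat.fib (j + e + 1) [MOD m] := by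
          rw [← Nat.fib_add_two, ← Nat.fib_add_two]
          have hi : i + e + 2 = i + (e + 1) + 1 := by omega
          have hj : j + e + 2 = j + (e + 1) + 1 := by omega
          simpa [hi, hj] using h2
        exact Nat.ModEq.add_right_cancel h1' h2'
      · have hi : i + (e + 1) = i + e + 1 := by omega
        have hj : j + (e + 1) = j + e + 1 := by omega
        simpa [hi, hj] using h1

-- pigeonhole: some positive index ≤ m^2 has m ∣ fib
theorem exists_fib_dvd (m : Nat) (hm : 1 ≤ m) :
    ∃ n, (1 ≤ n ∧ m ∣ Nat.fib n) ∧ n ≤ m * m := by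
  rcases eq_or_lt_of_le hm with h1 | h2
  · exact ⟨1, ⟨le_refl 1, by rw [← h1]; exact one_dvd _⟩, by nlinarith⟩
  have hmpos : 0 < m := by omega
  have key : ∀ a b : Nat, a < b → b ≤ m * m →
      Nat.fib a ≡ Nat.fib b [MOD m] → Nat.fib (a + 1) ≡ Nat.fib (b + 1) [MOD m] →
      ∃ n, (1 ≤ n ∧ m ∣ Nat.fib n) ∧ n ≤ m * m := by
    intro a b hab hb h1 h2
    refine ⟨b - a, ⟨by omega, ?_⟩, by omega⟩
    have hd : Nat.fib 0 ≡ Nat.fib (b - a) [MOD m] := by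
      apply fib_pair_descend m a 0 (b - a)
      · have hba : b - a + a = b := by omega
        simpa [hba] using h1
      · have hba : b - a + a = b := by omega
        simpa [hba] using h2
    have hz : Nat.fib (b - a) ≡ 0 [MOD m] := by simpa [Nat.fib_zero] using hd.symm
    exact (Nat.modEq_zero_iff_dvd).mp hz
  let f : Fin (m * m + 1) → Fin m × Fin m :=
    fun i => (⟨Nat.fib i % m, Nat.mod_lt _ hmpos⟩, ⟨Nat.fib (i + 1) % m, Nat.mod_lt _ hmpos⟩)
  have hcard : Fintype.card (Fin m × Fin m) < Fintype.card (Fin (m * m + 1)) := by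
    simp [Fintype.card_prod]
  obtain ⟨i, j, hne, hf⟩ := Fintype.exists_ne_map_eq_of_card_lt f hcard
  have hf1 : Nat.fib i % m = Nat.fib j % m := congrArg (fun x => (x.1 : Fin m).val) hf
  have hf2 : Nat.fib (i + 1) % m = Nat.fib (j + 1) % m := congrArg (fun x => (x.2 : Fin m).val) hf
  have hvne : (i : Nat) ≠ (j : Nat) := fun h => hne (Fin.ext h)
  have hib : (i : Nat) ≤ m * m := by omega
  have hjb : (j : Nat) ≤ m * m := by omega
  rcases Nat.lt_or_ge (i : Nat) (j : Nat) with hlt | hge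
  · exact key i j hlt hjb hf1 hf2
  · exact key j i (by omega) hib hf1.symm hf2.symm

theorem rkExists (m : Nat) (hm : 1 ≤ m) : ∃ n, 1 ≤ n ∧ m ∣ Nat.fib n := by
  obtain ⟨n, hn, _⟩ := exists_fib_dvd m hm
  exact ⟨n, hn⟩

-- the rank of apparition of m: the least positive index with m ∣ fib
def rk (m : Nat) : Nat := if h : 1 ≤ m then Nat.find (rkExists m h) else 0

theorem rk_pos (m : Nat) (hm : 1 ≤ m) : 1 ≤ rk m := by
  rw [rk, dif_pos hm]
  exact (Nat.find_spec (rkExists m hm)).1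

theorem rk_dvd (m : Nat) (hm : 1 ≤ m) : m ∣ Nat.fib (rk m) := by
  rw [rk, dif_pos hm]
  exact (Nat.find_spec (rkExists m hm)).2

theorem rk_min (m : Nat) (hm : 1 ≤ m) (n : Nat) (hn : 1 ≤ n) (hd : m ∣ Nat.fib n) :
    rk m ≤ n := by
  rw [rk, dif_pos hm]
  exact Nat.find_le ⟨hn, hd⟩

theorem rk_le_sq (m : Nat) (hm : 1 ≤ m) : rk m ≤ m * m := by
  obtain ⟨n, hn, hb⟩ := exists_fib_dvd m hm
  exact le_trans (rk_min m hm n hn.1 hn.2) hb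

-- the key characterisation: m ∣ fib n ↔ rk m ∣ n  (via fib_gcd and fib_dvd)
theorem dvd_fib_iff (m : Nat) (hm : 1 ≤ m) (n : Nat) : m ∣ Nat.fib n ↔ rk m ∣ n := by
  constructor
  · intro hd
    rcases Nat.eq_zero_or_pos n with rfl | hn
    · exact dvd_zero _
    · have hg : m ∣ Nat.fib (Nat.gcd (rk m) n) := by
        rw [Nat.fib_gcd]
        exact Nat.dvd_gcd (rk_dvd m hm) hd
      have hgpos : 1 ≤ Nat.gcd (rk m) n := Nat.gcd_pos_of_pos_right (rk m) hn
      have hle : rk m ≤ Nat.gcd (rk m) n := rk_min m hm _ hgpos hg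
      have hge : Nat.gcd (rk m) n ≤ rk m :=
        Nat.le_of_dvd (rk_pos m hm) (Nat.gcd_dvd_left _ _)
      have hg2 : Nat.gcd (rk m) n = rk m := by omega
      rw [← hg2]
      exact Nat.gcd_dvd_right _ _
  · intro hd
    exact dvd_trans (rk_dvd m hm) (Nat.fib_dvd _ _ hd)

theorem rk_one : rk 1 = 1 := by
  have h1 := rk_pos 1 (le_refl 1)
  have h2 := rk_min 1 (le_refl 1) 1 (le_refl 1) (one_dvd _)
  omega

theorem rk_unique (m : Nat) (hm : 1 ≤ m) (r : Nat) (_hr : 1 ≤ r)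
    (hch : ∀ n, m ∣ Nat.fib n ↔ r ∣ n) : rk m = r := by
  have h1 : rk m ∣ r := (dvd_fib_iff m hm r).mp ((hch r).mpr dvd_rfl)
  have h2 : r ∣ rk m := (hch (rk m)).mp (rk_dvd m hm)
  exact Nat.dvd_antisymm h1 h2

theorem rk_mul_coprime (a b : Nat) (ha : 1 ≤ a) (hb : 1 ≤ b) (hco : Nat.Coprime a b) :
    rk (a * b) = Nat.lcm (rk a) (rk b) := by
  have hab : 1 ≤ a * b := by nlinarith
  apply rk_unique (a * b) hab
  · exact Nat.lcm_pos (rk_pos a ha) (rk_pos b hb)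
  · intro n
    constructor
    · intro hd
      have hda : a ∣ Nat.fib n := dvd_trans (Dvd.intro b rfl) hd
      have hdb : b ∣ Nat.fib n := dvd_trans (Dvd.intro_left a rfl) hd
      exact Nat.lcm_dvd_iff.mpr ⟨(dvd_fib_iff a ha n).mp hda, (dvd_fib_iff b hb n).mp hdb⟩
    · intro hd
      have hda : a ∣ Nat.fib n :=
        (dvd_fib_iff a ha n).mpr (dvd_trans (Nat.dvd_lcm_left _ _) hd)
      have hdb : b ∣ Nat.fib n :=
        (dvd_fib_iff b hb n).mpr (dvd_trans (Nat.dvd_lcm_right _ _) hd)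
      exact Nat.Coprime.mul_dvd_of_dvd_of_dvd hco hda hdb

-- ---- correctness of port A's loop ----
theorem loopA_eq (d : Int) (hd : d ≠ 0) :
    ∀ (fuel k : Nat), k + 1 ≤ rk d.natAbs → rk d.natAbs ≤ k + 1 + fuel →
      fibodivLoopA d (Nat.fib k) (Nat.fib (k + 1)) ((k : Int) + 1) fuel = (rk d.natAbs : Int) := by
  have hm : 1 ≤ d.natAbs := by omega
  intro fuel
  induction fuel with
  | zero =>
      intro k h1 h2
      have hk : k + 1 = rk d.natAbs := by omega
      rw [fibodivLoopA, ← hk]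
      push_cast
      ring
  | succ fuel ih =>
      intro k h1 h2
      rw [fibodivLoopA]
      by_cases hdvd : d.natAbs ∣ Nat.fib (k + 1)
      · have hz : PySem.Int.mod ((Nat.fib (k + 1) : Nat) : Int) d = 0 :=
          (pymod_cast_eq_zero_iff d _).mpr hdvd
        rw [if_neg (by simpa using hz)]
        have hk : k + 1 = rk d.natAbs := by
          have := rk_min d.natAbs hm (k + 1) (by omega) hdvd
          omega
        rw [← hk]
        push_cast
        ring
      · have hz : PySem.Int.mod ((Nat.fib (k + 1) : Nat) : Int) d ≠ 0 := by
          intro h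
          exact hdvd ((pymod_cast_eq_zero_iff d _).mp h)
        rw [if_pos (by simpa using hz)]
        have hlt : k + 1 < rk d.natAbs := by
          rcases eq_or_lt_of_le h1 with he | hl
          · exact absurd (he ▸ rk_dvd d.natAbs hm) hdvd
          · exact hl
        have hfib : (Nat.fib (k + 1) : Int) + (Nat.fib k : Int) = (Nat.fib (k + 2) : Int) := by
          push_cast [Nat.fib_add_two]
          ring
        have hrec := ih (k + 1) (by omega) (by omega)
        rw [hfib]
        convert hrec using 2

theorem fibodiv_eq_rk (d : Int) (hd : d ≠ 0) : fibodiv d = (rk d.natAbs : Int) := by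
  have hm : 1 ≤ d.natAbs := by omega
  have h := loopA_eq d hd (d.natAbs * d.natAbs + 2) 0 (rk_pos _ hm)
    (by have := rk_le_sq d.natAbs hm; omega)
  simpa [fibodiv, Nat.fib_one] using h

-- ---- correctness of port B's _rank loop ----
theorem loopB_eq (Q : Nat) (hQ : 2 ≤ Q) :
    ∀ (fuel k : Nat), k + 1 ≤ rk Q → rk Q ≤ k + 1 + fuel →
      altRankLoop (Q : Int) (PySem.Int.mod (Nat.fib k : Int) (Q : Int))
        (PySem.Int.mod (Nat.fib (k + 1) : Int) (Q : Int)) ((k : Int) + 1) fuel = (rk Q : Int) := by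
  have hm : 1 ≤ Q := by omega
  have habs : ((Q : Int)).natAbs = Q := Int.natAbs_natCast Q
  intro fuel
  induction fuel with
  | zero =>
      intro k h1 h2
      have hk : k + 1 = rk Q := by omega
      rw [altRankLoop, ← hk]
      push_cast
      ring
  | succ fuel ih =>
      intro k h1 h2
      rw [altRankLoop]
      by_cases hdvd : Q ∣ Nat.fib (k + 1)
      · have hz : PySem.Int.mod ((Nat.fib (k + 1) : Nat) : Int) (Q : Int) = 0 := by
          rw [pymod_cast_eq_zero_iff, habs]; exact hdvd
        rw [if_neg (by simpa using hz)]
        have hk : k + 1 = rk Q := by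
          have := rk_min Q hm (k + 1) (by omega) hdvd
          omega
        rw [← hk]
        push_cast
        ring
      · have hz : PySem.Int.mod ((Nat.fib (k + 1) : Nat) : Int) (Q : Int) ≠ 0 := by
          intro h
          rw [pymod_cast_eq_zero_iff, habs] at h
          exact hdvd h
        rw [if_pos (by simpa using hz)]
        have hstep : PySem.Int.mod
            (PySem.Int.mod (Nat.fib k : Int) (Q : Int) + PySem.Int.mod (Nat.fib (k + 1) : Int) (Q : Int)) (Q : Int)
            = PySem.Int.mod (Nat.fib (k + 2) : Int) (Q : Int) := by
          apply pymod_congr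
          have h1' := pymod_sub_self_dvd (Q : Int) (Nat.fib k : Int)
          have h2' := pymod_sub_self_dvd (Q : Int) (Nat.fib (k + 1) : Int)
          have hsum := Dvd.dvd.add h1' h2'
          have hfib : (Nat.fib (k + 2) : Int) = (Nat.fib k : Int) + (Nat.fib (k + 1) : Int) := by
            push_cast [Nat.fib_add_two]
            ring
          rw [hfib]
          convert hsum using 1
          ring
        have hlt : k + 1 < rk Q := by
          rcases eq_or_lt_of_le h1 with he | hl
          · exact absurd (he ▸ rk_dvd Q hm) hdvd
          · exact hl
        have hrec := ih (k + 1) (by omega) (by omega)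
        rw [hstep]
        convert hrec using 2

theorem altRank_eq (Q : Nat) (hQ : 2 ≤ Q) : altRank (Q : Int) = (rk Q : Int) := by
  have hm : 1 ≤ Q := by omega
  have habs : ((Q : Int)).natAbs = Q := Int.natAbs_natCast Q
  have hmod0 : PySem.Int.mod (0 : Int) (Q : Int) = 0 :=
    (PySem.Int.mod_eq_zero_iff_dvd 0 (Q : Int)).mpr (dvd_zero _)
  have h := loopB_eq Q hQ (Q * Q + 2) 0 (rk_pos _ hm)
    (by have := rk_le_sq Q hm; omega)
  simp only [Nat.fib_zero, Nat.cast_zero] at h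
  rw [hmod0] at h
  simpa [altRank, habs] using h

-- ---- correctness of _gcd / _lcm ----
theorem gcdLoop_eq : ∀ (fuel : Nat) (a b : Nat), b ≤ fuel →
    altGcdLoop (a : Int) (b : Int) fuel = (Nat.gcd a b : Int) := by
  intro fuel
  induction fuel with
  | zero =>
      intro a b hb
      have hb0 : b = 0 := by omega
      subst hb0
      simp [altGcdLoop]
  | succ fuel ih =>
      intro a b hb
      rw [altGcdLoop]
      rcases Nat.eq_zero_or_pos b with rfl | hbpos
      · simp
      · rw [if_pos (by exact_mod_cast Nat.pos_iff_ne_zero.mp hbpos)]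
        rw [PySem.Int.mod_natCast]
        rw [ih b (a % b) (by have := Nat.mod_lt a hbpos; omega)]
        rw [Nat.gcd_comm b (a % b), ← Nat.gcd_rec b a, Nat.gcd_comm b a]

theorem altGcd_eq (a b : Nat) : altGcd (a : Int) (b : Int) = (Nat.gcd a b : Int) := by
  rw [altGcd, Int.natAbs_natCast]
  exact gcdLoop_eq (b + 1) a b (by omega)

theorem altLcm_eq (a b : Nat) (_ha : 1 ≤ a) (_hb : 1 ≤ b) :
    altLcm (a : Int) (b : Int) = (Nat.lcm a b : Int) := by
  rw [altLcm, altGcd_eq]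
  have hcast : ((a : Int)) * (b : Int) = ((a * b : Nat) : Int) := by push_cast; ring
  rw [hcast, PySem.Int.floordiv_natCast]
  congr 1

-- ---- correctness of the inner extraction loop ----
theorem extract_eq (P : Nat) (hP : 2 ≤ P) :
    ∀ (fuel R pe : Nat), 1 ≤ R → R ≤ fuel →
      ∃ k : Nat, altExtract (P : Int) (R : Int) (pe : Int) fuel
          = (((R / P ^ k : Nat) : Int), ((pe * P ^ k : Nat) : Int))
        ∧ P ^ k ∣ R ∧ ¬ P ∣ R / P ^ k := by
  intro fuel
  induction fuel with
  | zero => intro R pe h1 h2; omega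
  | succ fuel ih =>
      intro R pe h1 h2
      rw [altExtract]
      by_cases hdvd : P ∣ R
      · have hz : PySem.Int.mod (R : Int) (P : Int) = 0 := by
          rw [PySem.Int.mod_natCast, Nat.mod_eq_zero_of_dvd hdvd]
          rfl
        rw [if_pos hz, PySem.Int.floordiv_natCast]
        have hPR : P ≤ R := Nat.le_of_dvd (by omega) hdvd
        have hRP : 1 ≤ R / P := (Nat.one_le_div_iff (by omega)).mpr hPR
        have hlt : R / P < R := Nat.div_lt_self (by omega) (by omega)
        have hpe : ((pe : Int)) * (P : Int) = ((pe * P : Nat) : Int) := by push_cast; ring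
        rw [hpe]
        obtain ⟨k, heq, hdk, hnd⟩ := ih (R / P) (pe * P) hRP (by omega)
        refine ⟨k + 1, ?_, ?_, ?_⟩
        · rw [heq]
          have e1 : R / P / P ^ k = R / P ^ (k + 1) := by
            rw [Nat.div_div_eq_div_mul, ← pow_succ']
          have e2 : pe * P * P ^ k = pe * P ^ (k + 1) := by
            rw [pow_succ']
            ring
          rw [e1, e2]
        · have hmul : P ^ k * P ∣ (R / P) * P := mul_dvd_mul hdk dvd_rfl
          rw [Nat.div_mul_cancel hdvd] at hmul
          calc P ^ (k + 1) = P ^ k * P := pow_succ P k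
            _ ∣ R := hmul
        · have e1 : R / P ^ (k + 1) = R / P / P ^ k := by
            rw [Nat.div_div_eq_div_mul, ← pow_succ']
          rw [e1]
          exact hnd
      · have hz : PySem.Int.mod (R : Int) (P : Int) ≠ 0 := by
          rw [PySem.Int.mod_natCast]
          intro h
          exact hdvd (Nat.dvd_of_mod_eq_zero (by exact_mod_cast h))
        rw [if_neg hz]
        exact ⟨0, by simp, by simp, by simpa using hdvd⟩

-- ---- correctness of the trial-division outer loop ----
theorem outer_eq (M : Nat) (hM : 1 ≤ M) :
    ∀ (fuel R P C : Nat), 1 ≤ R → 2 ≤ P → C * R = M → Nat.Coprime C R →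
      (∀ q, q.Prime → q ∣ R → P ≤ q) →
      ∃ R' C' : Nat, altOuter (R : Int) (P : Int) ((rk C : Nat) : Int) fuel
          = ((R' : Int), ((rk C' : Nat) : Int))
        ∧ 1 ≤ R' ∧ C' * R' = M ∧ Nat.Coprime C' R' ∧ 1 ≤ C' := by
  intro fuel
  induction fuel with
  | zero =>
      intro R P C hR hP hCR hco hprimes
      have hC : 1 ≤ C := by
        rcases Nat.eq_zero_or_pos C with rfl | h
        · simp at hCR; omega
        · exact h
      exact ⟨R, C, rfl, hR, hCR, hco, hC⟩
  | succ fuel ih =>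
      intro R P C hR hP hCR hco hprimes
      have hC : 1 ≤ C := by
        rcases Nat.eq_zero_or_pos C with rfl | h
        · simp at hCR; omega
        · exact h
      rw [altOuter]
      by_cases hcond : ((P : Int)) * (P : Int) ≤ (R : Int)
      · rw [if_pos hcond]
        by_cases hdvd : P ∣ R
        · have hz : PySem.Int.mod (R : Int) (P : Int) = 0 := by
            rw [PySem.Int.mod_natCast, Nat.mod_eq_zero_of_dvd hdvd]
            rfl
          rw [if_pos hz]
          -- once p divides rem, p must be prime (all smaller primes were removed)
          have hPprime : P.Prime := by
            have hmf1 : Nat.minFac P ∣ R := dvd_trans (Nat.minFac_dvd P) hdvd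
            have hmf2 : P ≤ Nat.minFac P :=
              hprimes _ (Nat.minFac_prime (by omega)) hmf1
            have hmf3 : Nat.minFac P ≤ P := Nat.minFac_le (by omega)
            have hmf : Nat.minFac P = P := by omega
            rw [← hmf]
            exact Nat.minFac_prime (by omega)
          obtain ⟨k, heq, hdk, hnd⟩ := extract_eq P hP (R + 1) R 1 hR (by omega)
          rw [one_mul, Nat.cast_one] at heq
          have hk1 : 1 ≤ k := by
            rcases Nat.eq_zero_or_pos k with rfl | h
            · simp at hnd; exact absurd hdvd hnd
            · exact h
          have hPe2 : 2 ≤ P ^ k :=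
            le_trans hP (Nat.le_self_pow (by omega) P)
          have hPeR : P ^ k ∣ R := hdk
          have hR2 : 1 ≤ R / P ^ k :=
            (Nat.one_le_div_iff (by omega)).mpr (Nat.le_of_dvd (by omega) hPeR)
          have hcoCPe : Nat.Coprime C (P ^ k) := Nat.Coprime.coprime_dvd_right hPeR hco
          have hlcm : altLcm ((rk C : Nat) : Int) ((rk (P ^ k) : Nat) : Int)
              = ((rk (C * P ^ k) : Nat) : Int) := by
            rw [altLcm_eq _ _ (rk_pos C hC) (rk_pos (P ^ k) (by omega)),
              rk_mul_coprime C (P ^ k) hC (by omega) hcoCPe]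
          have hCR2 : (C * P ^ k) * (R / P ^ k) = M := by
            rw [mul_assoc, Nat.mul_div_cancel' hPeR]
            exact hCR
          have hdivdvd : R / P ^ k ∣ R := ⟨P ^ k, (Nat.div_mul_cancel hPeR).symm⟩
          have hco2 : Nat.Coprime (C * P ^ k) (R / P ^ k) := by
            apply Nat.Coprime.mul_left
            · exact Nat.Coprime.coprime_dvd_right hdivdvd hco
            · exact Nat.Coprime.pow_left k ((hPprime.coprime_iff_not_dvd).mpr hnd)
          have hprimes2 : ∀ q, q.Prime → q ∣ R / P ^ k → P + 1 ≤ q := by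
            intro q hq hqd
            have hqR : q ∣ R := dvd_trans hqd hdivdvd
            have h1 := hprimes q hq hqR
            have hqP : q ≠ P := by
              intro he
              subst he
              exact hnd hqd
            omega
          obtain ⟨R', C', heq2, hR', hCR', hco', hC'⟩ :=
            ih (R / P ^ k) (P + 1) (C * P ^ k) hR2 (by omega) hCR2 hco2 hprimes2
          refine ⟨R', C', ?_, hR', hCR', hco', hC'⟩
          rw [Int.natAbs_natCast, heq, altRank_eq (P ^ k) hPe2, hlcm]
          have hp1 : ((P : Int)) + 1 = (((P + 1 : Nat)) : Int) := by push_cast; ring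
          rw [hp1]
          exact heq2
        · have hz : PySem.Int.mod (R : Int) (P : Int) ≠ 0 := by
            rw [PySem.Int.mod_natCast]
            intro h
            exact hdvd (Nat.dvd_of_mod_eq_zero (by exact_mod_cast h))
          rw [if_neg hz]
          have hprimes2 : ∀ q, q.Prime → q ∣ R → P + 1 ≤ q := by
            intro q hq hqd
            have h1 := hprimes q hq hqd
            have hqP : q ≠ P := by
              intro he
              subst he
              exact hdvd hqd
            omega
          obtain ⟨R', C', heq2, hR', hCR', hco', hC'⟩ :=
            ih R (P + 1) C hR (by omega) hCR hco hprimes2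
          refine ⟨R', C', ?_, hR', hCR', hco', hC'⟩
          have hp1 : ((P : Int)) + 1 = (((P + 1 : Nat)) : Int) := by push_cast; ring
          rw [hp1]
          exact heq2
      · rw [if_neg hcond]
        exact ⟨R, C, rfl, hR, hCR, hco, hC⟩

theorem fibodiv_alt_eq_rk (d : Int) (hd : d ≠ 0) : fibodiv_alt d = (rk d.natAbs : Int) := by
  have hM : 1 ≤ d.natAbs := by omega
  have hifm : (if d < 0 then -d else d) = (d.natAbs : Int) := by
    split <;> omega
  rw [fibodiv_alt, hifm, Int.natAbs_natCast]
  obtain ⟨R', C', heq, hR', hCR', hco', hC'⟩ :=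
    outer_eq d.natAbs hM (d.natAbs + 2) d.natAbs 2 1 hM (le_refl 2) (one_mul _)
      (Nat.gcd_one_left _) (fun q hq _ => hq.two_le)
  rw [rk_one, Nat.cast_one] at heq
  have h2 : (((2 : Nat)) : Int) = (2 : Int) := by norm_num
  rw [h2] at heq
  rw [heq, altFinish]
  dsimp only
  by_cases hR1 : 1 < R'
  · rw [if_pos (by exact_mod_cast hR1), altRank_eq R' (by omega),
      altLcm_eq _ _ (rk_pos C' hC') (rk_pos R' (by omega)),
      ← rk_mul_coprime C' R' hC' (by omega) hco', hCR']
  · have hR'1 : R' = 1 := by omega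
    subst hR'1
    rw [if_neg (by norm_num)]
    have hCM : C' = d.natAbs := by omega
    rw [hCM]

-- ===== VERDICT (by name: the statement is the Claim_ definition above) =====
theorem fibodiv_spec : Claim_equal_fibodiv := by
  intro d _ hpre
  unfold Spec_fibodiv
  rw [fibodiv_eq_rk d hpre, fibodiv_alt_eq_rk d hpre]
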